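-- pv_equiv track=rewrite | github.com/ThomasBollmeier/advent-of-code-2023 | 14/main.py | get_left_limits
-- ===== SOURCE A (Python) =====
-- def get_left_limits(cells):
--   ret = []
--   curr_limit = 0
--   for idx, cell in enumerate(cells):
--     ret.append(curr_limit)
--     if cell == '#':
--       curr_limit = idx + 1
--   return ret
-- ===== SOURCE B (Python) =====
-- def get_left_limits(cells):
--     hashes = [i for i, c in enumerate(cells) if c == '#']
--     ret = []
--     limit = 0
--     start = 0
--     for h in hashes:
--         ret += [limit] * (h + 1 - start)
--         limit = h + 1
--         start = h + 1
--     ret += [limit] * (len(cells) - start)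
--     return ret
-- ===== Notes on version B (the rewrite author's own statement) =====
-- stated objective: alternative
-- what changed: B first collects the indices of '#' cells, then emits the output in whole segments ([limit] * width per gap between hashes, plus the trailing segment) instead of A's cell-by-cell scan that updates the limit as it goes.
import Mathlib
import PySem

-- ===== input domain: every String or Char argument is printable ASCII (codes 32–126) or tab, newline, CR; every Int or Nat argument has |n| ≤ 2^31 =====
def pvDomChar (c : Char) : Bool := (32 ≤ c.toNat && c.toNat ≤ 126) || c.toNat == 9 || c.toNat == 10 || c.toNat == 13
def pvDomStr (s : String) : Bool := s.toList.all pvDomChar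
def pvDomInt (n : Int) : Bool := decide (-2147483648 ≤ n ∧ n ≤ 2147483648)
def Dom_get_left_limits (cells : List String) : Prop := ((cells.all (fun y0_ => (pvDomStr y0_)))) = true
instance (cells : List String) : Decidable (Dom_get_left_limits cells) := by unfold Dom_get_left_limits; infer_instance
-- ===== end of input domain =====

-- B replaces A's update-as-you-scan loop by a hash-index collection pass followed by
-- segment fills ([limit] * width per segment); objective: alternative decomposition, same cost.

-- ===== PORT A =====
def get_left_limits (cells : List String) : List Int :=
  let r := (PySem.List.enumerate cells 0).foldl
    (fun (st : List Int × Int) p =>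
      let ret := st.1 ++ [st.2]
      if p.2 == "#" then (ret, p.1 + 1) else (ret, st.2))
    ([], 0)
  r.1

-- ===== PORT B =====
def get_left_limits_alt (cells : List String) : List Int :=
  let hashes := (PySem.List.enumerate cells 0).filterMap
    (fun p => if p.2 == "#" then some p.1 else none)
  let st := hashes.foldl
    (fun (st : List Int × Int × Int) h =>
      (st.1 ++ PySem.List.pyRepeat [st.2.1] (h + 1 - st.2.2), h + 1, h + 1))
    ([], 0, 0)
  st.1 ++ PySem.List.pyRepeat [st.2.1] ((cells.length : Int) - st.2.2)

-- ===== PRECONDITION & SPEC =====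
def Spec_get_left_limits (cells : List String) (out : List Int) : Prop := out = get_left_limits_alt cells
instance (cells : List String) (out : List Int) : Decidable (Spec_get_left_limits cells out) := by unfold Spec_get_left_limits; infer_instance

-- ===== CLAIM (what is proved, stated in full; the proofs are below) =====
def Claim_equal_get_left_limits : Prop := ∀ (cells : List String), Dom_get_left_limits cells → Spec_get_left_limits cells (get_left_limits cells)

-- ===== LEMMAS AND PROOFS =====

-- A's loop as structural recursion
def auxA : List String → Int → Int → List Int
  | [], _, _ => []
  | c :: cs, i, cl => cl :: auxA cs (i + 1) (if c == "#" then i + 1 else cl)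

-- the hash indices of cells starting at offset i
def hashIdx : List String → Int → List Int
  | [], _ => []
  | c :: cs, i => if c == "#" then i :: hashIdx cs (i + 1) else hashIdx cs (i + 1)

-- B's loop (plus trailing fill) as structural recursion on the hash list
def auxB : List Int → Int → Int → Int → List Int
  | [], l, s, n => PySem.List.pyRepeat [l] (n - s)
  | h :: hs, _l, s, n => PySem.List.pyRepeat [_l] (h + 1 - s) ++ auxB hs (h + 1) (h + 1) n

theorem foldA_eq (cs : List String) : ∀ (i : Int) (acc : List Int) (cl : Int),
    ((PySem.List.enumerate cs i).foldl
      (fun (st : List Int × Int) p =>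
        let ret := st.1 ++ [st.2]
        if p.2 == "#" then (ret, p.1 + 1) else (ret, st.2))
      (acc, cl)).1 = acc ++ auxA cs i cl := by
  induction cs with
  | nil => intro i acc cl; simp [PySem.List.enumerate_nil, auxA]
  | cons c cs ih =>
    intro i acc cl
    simp only [PySem.List.enumerate_cons, List.foldl_cons, auxA]
    simp only [beq_iff_eq] at ih ⊢
    by_cases h : c = "#"
    · simp only [h, if_true]
      simpa using ih (i + 1) (acc ++ [cl]) (i + 1)
    · simp only [h, if_false]
      simpa using ih (i + 1) (acc ++ [cl]) cl

theorem filterMap_eq (cs : List String) : ∀ (i : Int),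
    (PySem.List.enumerate cs i).filterMap
      (fun p => if p.2 == "#" then some p.1 else none) = hashIdx cs i := by
  induction cs with
  | nil => intro i; simp [PySem.List.enumerate_nil, hashIdx]
  | cons c cs ih =>
    intro i
    simp only [PySem.List.enumerate_cons, List.filterMap_cons, hashIdx]
    simp only [beq_iff_eq] at ih ⊢
    by_cases h : c = "#"
    · simp only [h, if_true]
      simp [ih (i + 1)]
    · simp only [h, if_false]
      simp [ih (i + 1)]

theorem foldB_eq (hs : List Int) : ∀ (acc : List Int) (l s n : Int),
    (let st := hs.foldl
      (fun (st : List Int × Int × Int) h =>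
        (st.1 ++ PySem.List.pyRepeat [st.2.1] (h + 1 - st.2.2), h + 1, h + 1))
      (acc, l, s)
     st.1 ++ PySem.List.pyRepeat [st.2.1] (n - st.2.2)) = acc ++ auxB hs l s n := by
  induction hs with
  | nil => intro acc l s n; simp [auxB]
  | cons h hs ih =>
    intro acc l s n
    simp only [List.foldl_cons, auxB]
    have := ih (acc ++ PySem.List.pyRepeat [l] (h + 1 - s)) (h + 1) (h + 1) n
    simp only at this
    rw [this, List.append_assoc]

theorem hashIdx_ge (cs : List String) : ∀ (i : Int), ∀ h ∈ hashIdx cs i, i ≤ h := by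
  induction cs with
  | nil => intro i h hh; simp [hashIdx] at hh
  | cons c cs ih =>
    intro i h hh
    simp only [hashIdx] at hh
    by_cases hc : c == "#" <;> simp [hc] at hh
    · rcases hh with rfl | hh
      · omega
      · have := ih (i + 1) h hh; omega
    · have := ih (i + 1) h hh; omega

theorem pyRepeat_succ (l : Int) (k : Int) (hk : 1 ≤ k) :
    PySem.List.pyRepeat [l] k = l :: PySem.List.pyRepeat [l] (k - 1) := by
  rw [PySem.List.pyRepeat_singleton, PySem.List.pyRepeat_singleton]
  have : k.toNat = (k - 1).toNat + 1 := by omega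
  rw [this, List.replicate_succ]

theorem auxB_shift (hs : List Int) (l s n : Int) (hn : s < n)
    (hge : ∀ h ∈ hs, s + 1 ≤ h) :
    auxB hs l s n = l :: auxB hs l (s + 1) n := by
  cases hs with
  | nil =>
    simp only [auxB]
    rw [pyRepeat_succ l (n - s) (by omega)]
    have : n - s - 1 = n - (s + 1) := by omega
    rw [this]
  | cons h hs =>
    simp only [auxB]
    have hh : s + 1 ≤ h := hge h (by simp)
    rw [pyRepeat_succ l (h + 1 - s) (by omega)]
    have : h + 1 - s - 1 = h + 1 - (s + 1) := by omega
    rw [this, List.cons_append]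

theorem auxB_auxA (cs : List String) : ∀ (i l : Int),
    auxB (hashIdx cs i) l i (i + cs.length) = auxA cs i l := by
  induction cs with
  | nil => intro i l; simp [hashIdx, auxA, auxB, PySem.List.pyRepeat_singleton]
  | cons c cs ih =>
    intro i l
    simp only [hashIdx, auxA]
    by_cases hc : (c == "#") = true
    · simp only [hc, if_true]
      simp only [auxB]
      rw [pyRepeat_succ l (i + 1 - i) (by omega)]
      have h1 : i + 1 - i - 1 = 0 := by omega
      have h2 : (i + ((c :: cs).length : Int)) = (i + 1) + (cs.length : Int) := by
        simp; omega
      rw [h1, h2, ih (i + 1) (i + 1)]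
      simp [PySem.List.pyRepeat_singleton]
    · simp only [Bool.not_eq_true] at hc
      simp only [hc, Bool.false_eq_true, if_false]
      have h2 : (i + ((c :: cs).length : Int)) = (i + 1) + (cs.length : Int) := by
        simp; omega
      rw [h2, auxB_shift (hashIdx cs (i + 1)) l i ((i + 1) + (cs.length : Int))
        (by omega) (fun h hh => hashIdx_ge cs (i + 1) h hh)]
      rw [ih (i + 1) l]

-- ===== VERDICT (by name: the statement is the Claim_ definition above) =====
theorem get_left_limits_spec : Claim_equal_get_left_limits := by
  intro cells _
  unfold Spec_get_left_limits get_left_limits get_left_limits_alt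
  rw [foldA_eq cells 0 [] 0, filterMap_eq cells 0]
  have := foldB_eq (hashIdx cells 0) [] 0 0 (cells.length : Int)
  simp only at this ⊢
  rw [this]
  have h := auxB_auxA cells 0 0
  simpa using h.symm
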